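-- pv_equiv track=rewrite | github.com/renyi89/proto_splitter | proto_splitter.py | parse_messages
-- ===== SOURCE A (Python) =====
-- def parse_messages(content):
--     messages = []
--     stack = []
--     current_message = ''
--     in_message = False
--
--     lines = content.splitlines()
--     for line in lines:
--         if 'message' in line or 'enum' in line:
--             if in_message:
--                 stack.append(current_message)
--             current_message = line
--             in_message = True
--         elif '}' in line and in_message:
--             current_message += '\n' + line
--             if stack:
--                 current_message = stack.pop() + '\n' + current_message
--             else:
--                 messages.append(current_message)
--                 current_message = ''
--                 in_message = False
--         elif in_message:
--             current_message += '\n' + line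
--
--     return messages
-- ===== SOURCE B (Python) =====
-- def parse_messages(content):
--     messages = []
--     current = []
--     depth = 0
--     for line in content.splitlines():
--         if 'message' in line or 'enum' in line:
--             current.append(line)
--             depth += 1
--         elif '}' in line and depth > 0:
--             current.append(line)
--             depth -= 1
--             if depth == 0:
--                 messages.append('\n'.join(current))
--                 current = []
--         elif depth > 0:
--             current.append(line)
--     return messages
-- ===== Notes on version B (the rewrite author's own statement) =====
-- stated objective: simpler
-- what changed: Replaces the stack of partial message strings and the pop-and-prepend reassembly with a single integer depth counter and one flat list of lines joined once when depth returns to 0.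
import Mathlib
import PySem

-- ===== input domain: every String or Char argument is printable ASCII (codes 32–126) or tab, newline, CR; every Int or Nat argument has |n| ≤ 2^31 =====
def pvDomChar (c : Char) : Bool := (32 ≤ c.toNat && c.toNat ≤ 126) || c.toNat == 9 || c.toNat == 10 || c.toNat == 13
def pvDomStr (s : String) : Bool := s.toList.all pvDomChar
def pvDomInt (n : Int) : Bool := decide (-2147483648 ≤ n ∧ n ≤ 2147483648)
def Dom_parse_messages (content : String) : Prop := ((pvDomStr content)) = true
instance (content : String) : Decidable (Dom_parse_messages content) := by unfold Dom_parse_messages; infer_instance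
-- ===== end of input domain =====

-- B replaces A's stack of partial strings (pop-and-prepend reassembly) with a depth counter and
-- one flat list of lines joined once per completed message: simpler, same O(n) cost.

-- ===== PORT A =====
-- state: (messages, stack, current_message, in_message)
def pvStepA (st : List String × List String × String × Bool) (line : String) :
    List String × List String × String × Bool :=
  let (messages, stack, current, inMsg) := st
  if PySem.Str.isIn "message" line || PySem.Str.isIn "enum" line then
    (messages, (if inMsg then stack ++ [current] else stack), line, true)
  else if PySem.Str.isIn "}" line && inMsg then
    let cur := current ++ "\n" ++ line
    match stack.getLast? with          -- 'if stack:' + stack.pop()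
    | some top => (messages, stack.dropLast, top ++ "\n" ++ cur, true)
    | none     => (messages ++ [cur], stack, "", false)
  else if inMsg then
    (messages, stack, current ++ "\n" ++ line, true)
  else st

def parse_messages (content : String) : List String :=
  ((PySem.Str.splitlines content).foldl pvStepA ([], [], "", false)).1

-- ===== PORT B =====
-- state: (messages, depth, current lines)
def pvStepB (st : List String × Int × List String) (line : String) :
    List String × Int × List String :=
  let (messages, depth, current) := st
  if PySem.Str.isIn "message" line || PySem.Str.isIn "enum" line then
    (messages, depth + 1, current ++ [line])
  else if PySem.Str.isIn "}" line && decide (0 < depth) then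
    let cur := current ++ [line]
    if depth - 1 = 0 then (messages ++ [PySem.Str.join "\n" cur], depth - 1, [])
    else (messages, depth - 1, cur)
  else if decide (0 < depth) then (messages, depth, current ++ [line])
  else st

def parse_messages_alt (content : String) : List String :=
  ((PySem.Str.splitlines content).foldl pvStepB ([], 0, [])).1

-- ===== PRECONDITION & SPEC =====
def Spec_parse_messages (content : String) (out : List String) : Prop := out = parse_messages_alt content
instance (content : String) (out : List String) : Decidable (Spec_parse_messages content out) := by unfold Spec_parse_messages; infer_instance

-- ===== CLAIM (what is proved, stated in full; the proofs are below) =====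
def Claim_equal_parse_messages : Prop := ∀ (content : String), Dom_parse_messages content → Spec_parse_messages content (parse_messages content)

-- ===== LEMMAS AND PROOFS =====

-- A's eventual reassembly of the stack: each popped element is prepended with '\n'
def pvReasm (stack : List String) (cur : String) : String :=
  stack.foldr (fun s acc => s ++ "\n" ++ acc) cur

lemma pvReasm_suffix (stack : List String) (c t : String) :
    pvReasm stack (c ++ t) = pvReasm stack c ++ t := by
  induction stack with
  | nil => rfl
  | cons s ss ih =>
      simp only [pvReasm, List.foldr] at ih ⊢
      rw [ih]; simp [String.append_assoc]

lemma pvReasm_push (stack : List String) (cur line : String) :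
    pvReasm stack (cur ++ "\n" ++ line) = pvReasm stack cur ++ "\n" ++ line := by
  rw [show cur ++ "\n" ++ line = cur ++ ("\n" ++ line) from by rw [String.append_assoc],
      pvReasm_suffix, ← String.append_assoc]

lemma pvReasm_split (stack : List String) (cur line : String) :
    pvReasm (stack ++ [cur]) line = pvReasm stack (cur ++ "\n" ++ line) := by
  simp [pvReasm, List.foldr_append]

lemma pvReasm_concat (stack : List String) (cur line : String) :
    pvReasm (stack ++ [cur]) line = pvReasm stack cur ++ "\n" ++ line := by
  rw [pvReasm_split, pvReasm_push]

lemma pvJoin_concat (xs : List String) (hx : xs ≠ []) (y : String) :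
    PySem.Str.join "\n" (xs ++ [y]) = PySem.Str.join "\n" xs ++ "\n" ++ y := by
  apply String.toList_inj.mp
  simp only [PySem.Str.toList_join, String.toList_append, List.map_append, List.map_cons, List.map_nil]
  obtain ⟨p, ps⟩ := List.exists_cons_of_ne_nil hx
  obtain ⟨ps, rfl⟩ := ps
  clear hx
  induction ps generalizing p with
  | nil => simp [PySem.Chars.join_cons_cons, PySem.Chars.join_singleton]
  | cons q qs ih =>
      simp only [List.map_cons, List.cons_append, PySem.Chars.join_cons_cons] at *
      rw [ih q]; simp

lemma pvJoin_singleton (y : String) : PySem.Str.join "\n" [y] = y := by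
  apply String.toList_inj.mp
  simp [PySem.Str.toList_join, PySem.Chars.join_singleton]

-- the invariant tying A's state to B's state
def pvRel (a : List String × List String × String × Bool) (b : List String × Int × List String) : Prop :=
  a.1 = b.1 ∧
  b.2.1 = a.2.1.length + (if a.2.2.2 then 1 else 0) ∧
  (a.2.2.2 = false → a.2.1 = [] ∧ a.2.2.1 = "" ∧ b.2.2 = []) ∧
  (a.2.2.2 = true → b.2.2 ≠ [] ∧ pvReasm a.2.1 a.2.2.1 = PySem.Str.join "\n" b.2.2)

lemma pvStep_rel (line : String) (a : List String × List String × String × Bool)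
    (b : List String × Int × List String) (h : pvRel a b) :
    pvRel (pvStepA a line) (pvStepB b line) := by
  obtain ⟨msA, stack, cur, inMsg⟩ := a
  obtain ⟨msB, depth, curB⟩ := b
  obtain ⟨hm, hd, hf, ht⟩ := h
  simp only at hm hd hf ht
  have hpos : (decide (0 < depth)) = inMsg := by
    cases inMsg with
    | false => obtain ⟨h1, -, -⟩ := hf rfl; simp [h1] at hd; simp [hd]
    | true => simp [hd]
  by_cases h1 : (PySem.Str.isIn "message" line || PySem.Str.isIn "enum" line) = true
  · -- keyword line
    simp only [pvStepA, pvStepB, h1, if_true]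
    cases inMsg with
    | false =>
        obtain ⟨hs, hc, hb⟩ := hf rfl
        subst hs hb
        simp only [pvRel, if_false, Bool.false_eq_true, Bool.true_eq_false, if_true]
        refine ⟨hm, ?_, by simp, fun _ => ⟨by simp, ?_⟩⟩
        · simp at hd ⊢; omega
        · simp [pvReasm, pvJoin_singleton]
    | true =>
        obtain ⟨hne, hr⟩ := ht rfl
        simp only [pvRel, if_true, Bool.true_eq_false]
        refine ⟨hm, ?_, by simp, fun _ => ⟨by simp, ?_⟩⟩
        · simp at hd ⊢; omega
        · rw [pvReasm_concat, hr, pvJoin_concat curB hne line]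
  · -- no keyword
    by_cases h2 : (PySem.Str.isIn "}" line && inMsg) = true
    · -- closing line while in a message: inMsg = true
      have hin : inMsg = true := by revert h2; cases inMsg <;> simp
      subst hin
      obtain ⟨hne, hr⟩ := ht rfl
      simp only [pvStepA, pvStepB, h1, if_false, Bool.false_eq_true, h2, hpos, if_true]
      have hjoin : pvReasm stack (cur ++ "\n" ++ line) = PySem.Str.join "\n" (curB ++ [line]) := by
        rw [pvReasm_push, hr, pvJoin_concat curB hne line]
      rcases stack.eq_nil_or_concat with rfl | ⟨ys, y, rfl⟩
      · have hd1 : depth - 1 = 0 := by simp at hd; omega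
        simp only [List.getLast?_nil, hd1, if_true, pvRel]
        have hstr : cur ++ "\n" ++ line = PySem.Str.join "\n" (curB ++ [line]) := by
          simpa [pvReasm] using hjoin
        exact ⟨by simp [hm, hstr], by simp, by simp, by simp⟩
      · simp only [List.concat_eq_append] at *
        have hd1 : ¬ (depth - 1 = 0) := by simp at hd; omega
        simp only [List.getLast?_concat, List.dropLast_concat, hd1, if_false, pvRel,
          Bool.true_eq_false]
        refine ⟨hm, ?_, by simp, fun _ => ⟨by simp, ?_⟩⟩
        · simp at hd ⊢; omega
        · rw [← pvReasm_split ys y (cur ++ "\n" ++ line)]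
          exact hjoin
    · -- neither keyword nor closing
      simp only [pvStepA, pvStepB, h1, if_false, Bool.false_eq_true, h2, hpos]
      cases inMsg with
      | false =>
          simp only [Bool.false_eq_true, if_false]
          exact ⟨hm, hd, hf, ht⟩
      | true =>
          obtain ⟨hne, hr⟩ := ht rfl
          have h2' : (PySem.Str.isIn "}" line && true) = false := by revert h2; simp
          simp only [if_true, pvRel, Bool.true_eq_false]
          refine ⟨hm, by simpa using hd, by simp, fun _ => ⟨by simp, ?_⟩⟩
          rw [pvReasm_push, hr, pvJoin_concat curB hne line]

lemma pvFold_rel (lines : List String) (a : List String × List String × String × Bool)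
    (b : List String × Int × List String) (h : pvRel a b) :
    (lines.foldl pvStepA a).1 = (lines.foldl pvStepB b).1 := by
  induction lines generalizing a b with
  | nil => exact h.1
  | cons l ls ih => exact ih _ _ (pvStep_rel l a b h)

-- ===== VERDICT (by name: the statement is the Claim_ definition above) =====
theorem parse_messages_spec : Claim_equal_parse_messages := by
  intro content _
  unfold Spec_parse_messages parse_messages parse_messages_alt
  exact pvFold_rel _ _ _ ⟨rfl, by simp, fun _ => ⟨rfl, rfl, rfl⟩, by simp⟩
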